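-- pv_equiv track=rewrite | github.com/gongohsamgong/AlgorithmStudy | BJ/8911.py | solution
-- ===== SOURCE A (Python) =====
-- def solution(order):
--     direc = 0 # 북0, 서1, 남2, 동3
--     x, y = 0, 0
--     dx = [0, -1, 0, 1]
--     dy = [1, 0, -1, 0]
--     min_x, min_y, max_x, max_y = 0, 0, 0, 0
--
--     for i in order:
--         if i == 'F':
--             x += dx[direc]
--             y += dy[direc]
--         elif i == 'B':
--             x -= dx[direc]
--             y -= dy[direc]
--         elif i == 'L':
--             if direc == 3:
--                 direc = 0
--             else:
--                 direc += 1
--         elif i == 'R':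
--             if direc == 0:
--                 direc = 3
--             else:
--                 direc -= 1
--         min_x = min(min_x, x)
--         min_y = min(min_y, y)
--         max_x = max(max_x, x)
--         max_y = max(max_y, y)
--
--     return (abs(max_x - min_x) * abs(max_y - min_y))
-- ===== SOURCE B (Python) =====
-- def solution(order):
--     # Back-to-front frame algebra: no position or heading is simulated. Walk the
--     # commands in reverse, maintaining the bounding box of the *remaining suffix*
--     # expressed in the turtle's current local frame (box always contains the
--     # origin): a move translates the box one unit, a turn rotates it by 90
--     # degrees, and after each command the box is re-clamped to contain the origin.
--     mnx = mny = mxx = mxy = 0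
--     for c in reversed(order):
--         if c == 'F':
--             mny += 1; mxy += 1
--         elif c == 'B':
--             mny -= 1; mxy -= 1
--         elif c == 'L':
--             mnx, mny, mxx, mxy = -mxy, mnx, -mny, mxx
--         elif c == 'R':
--             mnx, mny, mxx, mxy = mny, -mxx, mxy, -mnx
--         mnx = min(mnx, 0); mny = min(mny, 0)
--         mxx = max(mxx, 0); mxy = max(mxy, 0)
--     return (mxx - mnx) * (mxy - mny)
-- ===== Notes on version B (the rewrite author's own statement) =====
-- stated objective: alternative
-- what changed: B discards A's entire forward simulation (position, heading index into dx/dy tables, four running min/max updates): it scans the commands in reverse, maintaining only the bounding box of the already-processed suffix expressed in the turtle's local frame - a turn rotates the box by 90 degrees, a move translates it, and the box is re-clamped to contain the origin after each command; no coordinates or heading are ever tracked.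
import Mathlib
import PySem

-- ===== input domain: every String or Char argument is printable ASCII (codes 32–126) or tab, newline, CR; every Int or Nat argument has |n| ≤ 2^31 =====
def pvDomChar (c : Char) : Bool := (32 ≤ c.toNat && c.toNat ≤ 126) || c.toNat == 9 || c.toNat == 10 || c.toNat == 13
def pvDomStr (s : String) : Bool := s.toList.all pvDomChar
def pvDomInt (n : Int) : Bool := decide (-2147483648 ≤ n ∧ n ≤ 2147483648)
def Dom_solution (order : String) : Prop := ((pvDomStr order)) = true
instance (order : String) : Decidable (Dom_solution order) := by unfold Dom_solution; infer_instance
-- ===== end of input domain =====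

-- B replaces A's forward walk simulation (position, heading index, running min/max)
-- by a reverse scan that keeps only the suffix's bounding box in the turtle's local
-- frame, rotating/translating the box itself on each command (alternative algorithm).

-- ===== PORT A =====
def dxlA : List Int := [0, -1, 0, 1]
def dylA : List Int := [1, 0, -1, 0]

-- state: (direc, x, y, min_x, min_y, max_x, max_y); direc stays in 0..3, so the
-- .getD 0 after pyGet? is never taken (pyGet? is exact for Python's dx[direc]).
def aStep (st : Int × Int × Int × Int × Int × Int × Int) (c : Char) :
    Int × Int × Int × Int × Int × Int × Int :=
  let (direc, x, y, mnx, mny, mxx, mxy) := st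
  let (direc, x, y) :=
    if c = 'F' then
      (direc, x + (PySem.List.pyGet? dxlA direc).getD 0, y + (PySem.List.pyGet? dylA direc).getD 0)
    else if c = 'B' then
      (direc, x - (PySem.List.pyGet? dxlA direc).getD 0, y - (PySem.List.pyGet? dylA direc).getD 0)
    else if c = 'L' then
      (if direc = 3 then ((0 : Int), x, y) else (direc + 1, x, y))
    else if c = 'R' then
      (if direc = 0 then ((3 : Int), x, y) else (direc - 1, x, y))
    else (direc, x, y)
  (direc, x, y, min mnx x, min mny y, max mxx x, max mxy y)

def solution (order : String) : Int :=
  let (_, _, _, mnx, mny, mxx, mxy) := order.toList.foldl aStep (0, 0, 0, 0, 0, 0, 0)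
  |mxx - mnx| * |mxy - mny|

-- ===== PORT B =====
-- state: the bounding box (mnx, mny, mxx, mxy) of the suffix path, in the local frame
def bStep (box : Int × Int × Int × Int) (c : Char) : Int × Int × Int × Int :=
  let (mnx, mny, mxx, mxy) := box
  let (mnx, mny, mxx, mxy) :=
    if c = 'F' then (mnx, mny + 1, mxx, mxy + 1)
    else if c = 'B' then (mnx, mny - 1, mxx, mxy - 1)
    else if c = 'L' then (-mxy, mnx, -mny, mxx)
    else if c = 'R' then (mny, -mxx, mxy, -mnx)
    else (mnx, mny, mxx, mxy)
  (min mnx 0, min mny 0, max mxx 0, max mxy 0)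

def solution_alt (order : String) : Int :=
  let (mnx, mny, mxx, mxy) := order.toList.reverse.foldl bStep (0, 0, 0, 0)
  (mxx - mnx) * (mxy - mny)

-- ===== PRECONDITION & SPEC =====
def Spec_solution (order : String) (out : Int) : Prop := out = solution_alt order
instance (order : String) (out : Int) : Decidable (Spec_solution order out) := by unfold Spec_solution; infer_instance

-- ===== CLAIM (what is proved, stated in full; the proofs are below) =====
def Claim_equal_solution : Prop := ∀ (order : String), Dom_solution order → Spec_solution order (solution order)

-- ===== LEMMAS AND PROOFS =====
-- model: pose = (x, y, dx, dy)
def vec (d : Int) : Int × Int :=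
  if d = 0 then (0, 1) else if d = 1 then (-1, 0) else if d = 2 then (0, -1) else (1, 0)

def poseStep (p : Int × Int × Int × Int) (c : Char) : Int × Int × Int × Int :=
  let (x, y, dx, dy) := p
  if c = 'F' then (x + dx, y + dy, dx, dy)
  else if c = 'B' then (x - dx, y - dy, dx, dy)
  else if c = 'L' then (x, y, -dy, dx)
  else if c = 'R' then (x, y, dy, -dx)
  else (x, y, dx, dy)

-- positions visited after each command
def path (p : Int × Int × Int × Int) : List Char → List (Int × Int)
  | [] => []
  | c :: cs => let p' := poseStep p c; (p'.1, p'.2.1) :: path p' cs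

def upd (b : Int × Int × Int × Int) (q : Int × Int) : Int × Int × Int × Int :=
  (min b.1 q.1, min b.2.1 q.2, max b.2.2.1 q.1, max b.2.2.2 q.2)

def bbox (b : Int × Int × Int × Int) (l : List (Int × Int)) : Int × Int × Int × Int :=
  l.foldl upd b

-- ---- A side: A's fold computes bbox (0,0,0,0) (path origin cs) ----
lemma get_dx (d : Int) (hd : d = 0 ∨ d = 1 ∨ d = 2 ∨ d = 3) :
    (PySem.List.pyGet? dxlA d).getD 0 = (vec d).1 := by
  rcases hd with h | h | h | h <;> subst h <;> decide

lemma get_dy (d : Int) (hd : d = 0 ∨ d = 1 ∨ d = 2 ∨ d = 3) :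
    (PySem.List.pyGet? dylA d).getD 0 = (vec d).2 := by
  rcases hd with h | h | h | h <;> subst h <;> decide

def AgreeA (ast : Int × Int × Int × Int × Int × Int × Int)
    (p : Int × Int × Int × Int) (b : Int × Int × Int × Int) : Prop :=
  let (d, x, y, mnx, mny, mxx, mxy) := ast
  (d = 0 ∨ d = 1 ∨ d = 2 ∨ d = 3) ∧ p.1 = x ∧ p.2.1 = y ∧ (p.2.2.1, p.2.2.2) = vec d ∧
    b = (mnx, mny, mxx, mxy)

lemma agreeA_step (ast : Int × Int × Int × Int × Int × Int × Int)
    (p : Int × Int × Int × Int) (b : Int × Int × Int × Int) (c : Char)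
    (h : AgreeA ast p b) :
    AgreeA (aStep ast c) (poseStep p c) (upd b ((poseStep p c).1, (poseStep p c).2.1)) := by
  obtain ⟨d, ax, ay, mnx, mny, mxx, mxy⟩ := ast
  obtain ⟨x, y, dx, dy⟩ := p
  obtain ⟨hd, hx, hy, hv, hb⟩ := h
  simp only at hx hy
  subst hx hy hb
  have hdx : dx = (vec d).1 := by rw [← hv]
  have hdy : dy = (vec d).2 := by rw [← hv]
  by_cases hF : c = 'F'
  · subst hF
    simp only [aStep, poseStep, Char.reduceEq, reduceIte, AgreeA, upd]
    refine ⟨hd, ?_, ?_, hv, ?_⟩ <;>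
      simp [hdx, hdy, get_dx d hd, get_dy d hd]
  by_cases hB : c = 'B'
  · subst hB
    simp only [aStep, poseStep, Char.reduceEq, reduceIte, AgreeA, upd]
    refine ⟨hd, ?_, ?_, hv, ?_⟩ <;>
      simp [hdx, hdy, get_dx d hd, get_dy d hd]
  by_cases hL : c = 'L'
  · subst hL
    simp only [aStep, poseStep, Char.reduceEq, reduceIte, AgreeA, upd]
    rcases hd with h | h | h | h <;> subst h <;>
      refine ⟨by norm_num, rfl, rfl, by rw [hdx, hdy]; rfl, rfl⟩
  by_cases hR : c = 'R'
  · subst hR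
    simp only [aStep, poseStep, Char.reduceEq, reduceIte, AgreeA, upd]
    rcases hd with h | h | h | h <;> subst h <;>
      refine ⟨by norm_num, rfl, rfl, by rw [hdx, hdy]; rfl, rfl⟩
  · simp only [aStep, poseStep, if_neg hF, if_neg hB, if_neg hL, if_neg hR, AgreeA, upd]
    exact ⟨hd, trivial, trivial, hv, trivial⟩

lemma agreeA_fold (cs : List Char) (ast : Int × Int × Int × Int × Int × Int × Int)
    (p : Int × Int × Int × Int) (b : Int × Int × Int × Int) (h : AgreeA ast p b) :
    AgreeA (cs.foldl aStep ast) (cs.foldl poseStep p) (bbox b (path p cs)) := by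
  induction cs generalizing ast p b with
  | nil => exact h
  | cons c cs ih =>
      simpa [path, bbox, List.foldl] using ih (aStep ast c) (poseStep p c) _ (agreeA_step _ _ _ c h)

-- ---- box algebra ----
lemma upd_comm (b : Int × Int × Int × Int) (q r : Int × Int) :
    upd (upd b q) r = upd (upd b r) q := by
  obtain ⟨a1, a2, a3, a4⟩ := b
  simp only [upd, Prod.mk.injEq]
  omega

lemma bbox_upd (b : Int × Int × Int × Int) (q : Int × Int) (l : List (Int × Int)) :
    bbox (upd b q) l = upd (bbox b l) q := by
  induction l generalizing b with
  | nil => rfl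
  | cons p l ih => simp only [bbox, List.foldl] at *; rw [upd_comm, ih]

lemma bbox_mono (b : Int × Int × Int × Int) (l : List (Int × Int)) :
    (bbox b l).1 ≤ b.1 ∧ (bbox b l).2.1 ≤ b.2.1 ∧
      b.2.2.1 ≤ (bbox b l).2.2.1 ∧ b.2.2.2 ≤ (bbox b l).2.2.2 := by
  induction l generalizing b with
  | nil => exact ⟨le_refl _, le_refl _, le_refl _, le_refl _⟩
  | cons p l ih =>
      have h := ih (upd b p)
      simp only [bbox, List.foldl, upd] at h ⊢
      omega

-- box transforms commute with bbox over the correspondingly mapped points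
lemma bbox_trans (a c x1 y1 x2 y2 : Int) (l : List (Int × Int)) :
    bbox (x1 + a, y1 + c, x2 + a, y2 + c) (l.map (fun q => (q.1 + a, q.2 + c))) =
      ((bbox (x1, y1, x2, y2) l).1 + a, (bbox (x1, y1, x2, y2) l).2.1 + c,
       (bbox (x1, y1, x2, y2) l).2.2.1 + a, (bbox (x1, y1, x2, y2) l).2.2.2 + c) := by
  induction l generalizing x1 y1 x2 y2 with
  | nil => rfl
  | cons p l ih =>
      simp only [bbox, List.map, List.foldl] at *
      rw [show upd (x1 + a, y1 + c, x2 + a, y2 + c) (p.1 + a, p.2 + c)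
            = (min x1 p.1 + a, min y1 p.2 + c, max x2 p.1 + a, max y2 p.2 + c) by
          simp [upd],
        show upd (x1, y1, x2, y2) p = (min x1 p.1, min y1 p.2, max x2 p.1, max y2 p.2) from rfl]
      exact ih _ _ _ _

lemma bbox_rotL (x1 y1 x2 y2 : Int) (l : List (Int × Int)) :
    bbox (-y2, x1, -y1, x2) (l.map (fun q => (-q.2, q.1))) =
      (-(bbox (x1, y1, x2, y2) l).2.2.2, (bbox (x1, y1, x2, y2) l).1,
       -(bbox (x1, y1, x2, y2) l).2.1, (bbox (x1, y1, x2, y2) l).2.2.1) := by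
  induction l generalizing x1 y1 x2 y2 with
  | nil => rfl
  | cons p l ih =>
      simp only [bbox, List.map, List.foldl] at *
      rw [show upd (-y2, x1, -y1, x2) (-p.2, p.1)
            = (-(max y2 p.2), min x1 p.1, -(min y1 p.2), max x2 p.1) by
          simp [upd],
        show upd (x1, y1, x2, y2) p = (min x1 p.1, min y1 p.2, max x2 p.1, max y2 p.2) from rfl]
      exact ih _ _ _ _

lemma bbox_rotR (x1 y1 x2 y2 : Int) (l : List (Int × Int)) :
    bbox (y1, -x2, y2, -x1) (l.map (fun q => (q.2, -q.1))) =
      ((bbox (x1, y1, x2, y2) l).2.1, -(bbox (x1, y1, x2, y2) l).2.2.1,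
       (bbox (x1, y1, x2, y2) l).2.2.2, -(bbox (x1, y1, x2, y2) l).1) := by
  induction l generalizing x1 y1 x2 y2 with
  | nil => rfl
  | cons p l ih =>
      simp only [bbox, List.map, List.foldl] at *
      rw [show upd (y1, -x2, y2, -x1) (p.2, -p.1)
            = (min y1 p.2, -(max x2 p.1), max y2 p.2, -(min x1 p.1)) by
          simp [upd],
        show upd (x1, y1, x2, y2) p = (min x1 p.1, min y1 p.2, max x2 p.1, max y2 p.2) from rfl]
      exact ih _ _ _ _

-- pose transforms commute with poseStep
lemma poseStep_trans (a c x y dx dy : Int) (ch : Char) :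
    poseStep (x + a, y + c, dx, dy) ch =
      ((poseStep (x, y, dx, dy) ch).1 + a, (poseStep (x, y, dx, dy) ch).2.1 + c,
       (poseStep (x, y, dx, dy) ch).2.2.1, (poseStep (x, y, dx, dy) ch).2.2.2) := by
  simp only [poseStep]
  split_ifs <;> simp [Prod.ext_iff] <;> and_intros <;> omega

lemma poseStep_rotL (x y dx dy : Int) (ch : Char) :
    poseStep (-y, x, -dy, dx) ch =
      (-(poseStep (x, y, dx, dy) ch).2.1, (poseStep (x, y, dx, dy) ch).1,
       -(poseStep (x, y, dx, dy) ch).2.2.2, (poseStep (x, y, dx, dy) ch).2.2.1) := by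
  simp only [poseStep]
  split_ifs <;> simp [Prod.ext_iff] <;> and_intros <;> omega

lemma poseStep_rotR (x y dx dy : Int) (ch : Char) :
    poseStep (y, -x, dy, -dx) ch =
      ((poseStep (x, y, dx, dy) ch).2.1, -(poseStep (x, y, dx, dy) ch).1,
       (poseStep (x, y, dx, dy) ch).2.2.2, -(poseStep (x, y, dx, dy) ch).2.2.1) := by
  simp only [poseStep]
  split_ifs <;> simp [Prod.ext_iff] <;> and_intros <;> omega

-- path equivariance under rigid motions of the start pose
lemma path_trans (a c x y dx dy : Int) (cs : List Char) :
    path (x + a, y + c, dx, dy) cs =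
      (path (x, y, dx, dy) cs).map (fun q => (q.1 + a, q.2 + c)) := by
  induction cs generalizing x y dx dy with
  | nil => rfl
  | cons ch cs ih =>
      simp only [path, poseStep_trans, List.map]
      refine congrArg₂ List.cons rfl ?_
      obtain ⟨x', y', dx', dy'⟩ := poseStep (x, y, dx, dy) ch
      exact ih x' y' dx' dy'

lemma path_rotL (x y dx dy : Int) (cs : List Char) :
    path (-y, x, -dy, dx) cs = (path (x, y, dx, dy) cs).map (fun q => (-q.2, q.1)) := by
  induction cs generalizing x y dx dy with
  | nil => rfl
  | cons ch cs ih =>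
      simp only [path, poseStep_rotL, List.map]
      refine congrArg₂ List.cons rfl ?_
      obtain ⟨x', y', dx', dy'⟩ := poseStep (x, y, dx, dy) ch
      exact ih x' y' dx' dy'

lemma path_rotR (x y dx dy : Int) (cs : List Char) :
    path (y, -x, dy, -dx) cs = (path (x, y, dx, dy) cs).map (fun q => (q.2, -q.1)) := by
  induction cs generalizing x y dx dy with
  | nil => rfl
  | cons ch cs ih =>
      simp only [path, poseStep_rotR, List.map]
      refine congrArg₂ List.cons rfl ?_
      obtain ⟨x', y', dx', dy'⟩ := poseStep (x, y, dx, dy) ch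
      exact ih x' y' dx' dy'

lemma bbox_cons (b : Int × Int × Int × Int) (q : Int × Int) (l : List (Int × Int)) :
    bbox b (q :: l) = bbox (upd b q) l := rfl

-- ---- B side: the backward fold computes the same bbox ----
lemma bFold (cs : List Char) :
    cs.foldr (fun c b => bStep b c) (0, 0, 0, 0) = bbox (0, 0, 0, 0) (path (0, 0, 0, 1) cs) := by
  induction cs with
  | nil => rfl
  | cons c cs ih =>
      simp only [List.foldr, ih, path, poseStep]
      by_cases hF : c = 'F'
      · subst hF
        simp only [Char.reduceEq, reduceIte]
        have hpath := path_trans 0 1 0 0 0 1 cs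
        norm_num at hpath ⊢
        rw [hpath, bbox_cons]
        rw [show upd ((0 : Int), (0 : Int), (0 : Int), (0 : Int)) ((0 : Int), (1 : Int))
              = upd ((0 : Int), (1 : Int), (0 : Int), (1 : Int)) ((0 : Int), (0 : Int)) from by decide]
        rw [bbox_upd]
        have hbox := bbox_trans 0 1 0 0 0 0 (path (0, 0, 0, 1) cs)
        norm_num at hbox
        rw [hbox]
        obtain ⟨b1, b2, b3, b4⟩ := bbox ((0 : Int), (0 : Int), (0 : Int), (0 : Int)) (path (0, 0, 0, 1) cs)
        rfl
      by_cases hB : c = 'B'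
      · subst hB
        simp only [Char.reduceEq, reduceIte]
        have hpath := path_trans 0 (-1) 0 0 0 1 cs
        norm_num at hpath ⊢
        rw [hpath, bbox_cons]
        rw [show upd ((0 : Int), (0 : Int), (0 : Int), (0 : Int)) ((0 : Int), (-1 : Int))
              = upd ((0 : Int), (-1 : Int), (0 : Int), (-1 : Int)) ((0 : Int), (0 : Int)) from by decide]
        rw [bbox_upd]
        have hbox := bbox_trans 0 (-1) 0 0 0 0 (path (0, 0, 0, 1) cs)
        norm_num at hbox
        rw [hbox]
        obtain ⟨b1, b2, b3, b4⟩ := bbox ((0 : Int), (0 : Int), (0 : Int), (0 : Int)) (path (0, 0, 0, 1) cs)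
        rfl
      by_cases hL : c = 'L'
      · subst hL
        simp only [Char.reduceEq, reduceIte]
        have hpath := path_rotL 0 0 0 1 cs
        norm_num at hpath ⊢
        rw [hpath, bbox_cons]
        rw [show upd ((0 : Int), (0 : Int), (0 : Int), (0 : Int)) ((0 : Int), (0 : Int))
              = upd ((0 : Int), (0 : Int), (0 : Int), (0 : Int)) ((0 : Int), (0 : Int)) from rfl]
        rw [bbox_upd]
        have hbox := bbox_rotL 0 0 0 0 (path (0, 0, 0, 1) cs)
        norm_num at hbox
        rw [hbox]
        obtain ⟨b1, b2, b3, b4⟩ := bbox ((0 : Int), (0 : Int), (0 : Int), (0 : Int)) (path (0, 0, 0, 1) cs)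
        rfl
      by_cases hR : c = 'R'
      · subst hR
        simp only [Char.reduceEq, reduceIte]
        have hpath := path_rotR 0 0 0 1 cs
        norm_num at hpath ⊢
        rw [hpath, bbox_cons]
        rw [bbox_upd]
        have hbox := bbox_rotR 0 0 0 0 (path (0, 0, 0, 1) cs)
        norm_num at hbox
        rw [hbox]
        obtain ⟨b1, b2, b3, b4⟩ := bbox ((0 : Int), (0 : Int), (0 : Int), (0 : Int)) (path (0, 0, 0, 1) cs)
        rfl
      · simp only [if_neg hF, if_neg hB, if_neg hL, if_neg hR]
        rw [bbox_cons]
        rw [show upd ((0 : Int), (0 : Int), (0 : Int), (0 : Int)) ((0 : Int), (0 : Int))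
              = ((0 : Int), (0 : Int), (0 : Int), (0 : Int)) from rfl]
        have hm := bbox_mono (0, 0, 0, 0) (path (0, 0, 0, 1) cs)
        generalize hg : bbox ((0 : Int), (0 : Int), (0 : Int), (0 : Int)) (path ((0 : Int), (0 : Int), (0 : Int), (1 : Int)) cs) = B at hm ⊢
        obtain ⟨b1, b2, b3, b4⟩ := B
        simp only [bStep, if_neg hF, if_neg hB, if_neg hL, if_neg hR, Prod.mk.injEq]
        simp only at hm
        refine ⟨by omega, by omega, by omega, by omega⟩

-- ===== VERDICT (by name: the statement is the Claim_ definition above) =====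
theorem solution_spec : Claim_equal_solution := by
  intro order _
  unfold Spec_solution solution solution_alt
  have hB : order.toList.reverse.foldl bStep (0, 0, 0, 0)
      = bbox (0, 0, 0, 0) (path (0, 0, 0, 1) order.toList) := by
    rw [List.foldl_reverse]; exact bFold _
  have hA := agreeA_fold order.toList (0, 0, 0, 0, 0, 0, 0) (0, 0, 0, 1) (0, 0, 0, 0)
    ⟨Or.inl rfl, rfl, rfl, rfl, rfl⟩
  have hm := bbox_mono (0, 0, 0, 0) (path (0, 0, 0, 1) order.toList)
  rw [hB]
  revert hA
  obtain ⟨d, ax, ay, mnx, mny, mxx, mxy⟩ := order.toList.foldl aStep (0, 0, 0, 0, 0, 0, 0)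
  rintro ⟨-, -, -, -, hb⟩
  rw [hb] at hm ⊢
  simp only at hm
  dsimp only
  rw [abs_of_nonneg (by omega), abs_of_nonneg (by omega)]
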